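-- pv_equiv track=rewrite | github.com/jason6842/CodePath | Breakout Problems Session 1/AdvancedProblemSetV1.py | tiggerfy
-- ===== SOURCE A (Python) =====
-- def tiggerfy(word):
--     word_lower = word.lower()
--     res = ""
--     i = 0
--     while i < len(word):
--         if i < len(word) - 1 and word_lower[i:i + 2] == "gg":
--             i += 2
--         elif i < len(word) - 1 and word_lower[i:i + 2] == "er":
--             i += 2
--         elif word_lower[i] in "ti":
--             i += 1
--         else:
--             res += word[i]
--             i += 1
--     return res
--
-- word = "Choir"
-- ===== SOURCE B (Python) =====
-- import re
--
-- _PAT = re.compile(r'gg|er|[ti]', re.IGNORECASE)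
--
-- def tiggerfy(word):
--     return _PAT.sub('', word)
-- ===== Notes on version B (the rewrite author's own statement) =====
-- stated objective: faster
-- what changed: Replaces the hand-written index-walking while loop (precomputed lowercase copy, slice comparisons, quadratic res += char string accumulation) by a single precompiled case-insensitive regex substitution deleting every match of gg|er|[ti], whose leftmost non-overlapping scan with branch-priority alternation reproduces the loop exactly.
import Mathlib
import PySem

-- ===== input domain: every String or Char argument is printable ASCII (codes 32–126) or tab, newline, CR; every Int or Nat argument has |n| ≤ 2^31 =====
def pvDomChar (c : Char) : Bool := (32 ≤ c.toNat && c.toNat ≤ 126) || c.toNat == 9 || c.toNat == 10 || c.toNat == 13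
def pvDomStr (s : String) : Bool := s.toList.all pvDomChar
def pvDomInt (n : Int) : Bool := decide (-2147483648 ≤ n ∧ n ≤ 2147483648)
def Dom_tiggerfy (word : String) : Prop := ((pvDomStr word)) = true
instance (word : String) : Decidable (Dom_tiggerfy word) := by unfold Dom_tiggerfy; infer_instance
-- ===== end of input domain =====

-- B replaces A's index-walking while loop (with its quadratic res += char string
-- accumulation) by a single case-insensitive regex substitution deleting every match
-- of gg|er|[ti] (objective: faster, measured); return values agree.

-- ===== PORT A =====
-- A's while loop: index i walks forward over word, word_lower precomputed,
-- res accumulated by string append.  Recursion on the remaining length w.length - i.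
def tiggerfyLoop (w wl : List Char) (i : Nat) (res : List Char) : List Char :=
  if _h : i < w.length then
    if i < w.length - 1 ∧ PySem.List.slice wl (some (i : Int)) (some ((i : Int) + 2)) = ['g', 'g'] then
      tiggerfyLoop w wl (i + 2) res
    else if i < w.length - 1 ∧ PySem.List.slice wl (some (i : Int)) (some ((i : Int) + 2)) = ['e', 'r'] then
      tiggerfyLoop w wl (i + 2) res
    else if PySem.Chars.isIn [PySem.List.pyGetD wl (i : Int) ' '] ['t', 'i'] then
      tiggerfyLoop w wl (i + 1) res
    else
      tiggerfyLoop w wl (i + 1) (res ++ [PySem.List.pyGetD w (i : Int) ' '])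
  else res
termination_by w.length - i
decreasing_by all_goals omega

def tiggerfy (word : String) : String :=
  String.mk (tiggerfyLoop word.toList (PySem.Chars.lower word.toList) 0 [])

-- ===== PORT B =====
-- Hand port of re.sub(r'gg|er|[ti]', '', word, flags=IGNORECASE): the regex engine's
-- leftmost non-overlapping scan — at each position try 'gg', then 'er', then [ti]
-- case-insensitively, delete the match and continue after it, otherwise keep the
-- character; exact for this literal alternation pattern.
def tiggerfyScan : List Char → List Char
  | [] => []
  | [c] =>
    if PySem.Chars.lowerChar c = 't' ∨ PySem.Chars.lowerChar c = 'i' then [] else [c]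
  | c1 :: c2 :: rest =>
    if (PySem.Chars.lowerChar c1 = 'g' ∧ PySem.Chars.lowerChar c2 = 'g') ∨
       (PySem.Chars.lowerChar c1 = 'e' ∧ PySem.Chars.lowerChar c2 = 'r') then
      tiggerfyScan rest
    else if PySem.Chars.lowerChar c1 = 't' ∨ PySem.Chars.lowerChar c1 = 'i' then
      tiggerfyScan (c2 :: rest)
    else
      c1 :: tiggerfyScan (c2 :: rest)

def tiggerfy_alt (word : String) : String :=
  String.mk (tiggerfyScan word.toList)

-- ===== PRECONDITION & SPEC =====
def Spec_tiggerfy (word : String) (out : String) : Prop := out = tiggerfy_alt word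
instance (word : String) (out : String) : Decidable (Spec_tiggerfy word out) := by unfold Spec_tiggerfy; infer_instance

-- ===== CLAIM (what is proved, stated in full; the proofs are below) =====
def Claim_equal_tiggerfy : Prop := ∀ (word : String), Dom_tiggerfy word → Spec_tiggerfy word (tiggerfy word)

-- ===== LEMMAS AND PROOFS =====

-- A's loop state (i, res) computes res ++ (scan of the untouched suffix).
set_option maxHeartbeats 1000000 in
lemma tiggerfyLoop_eq_scan (w : List Char) (i : Nat) (res : List Char) (hi : i ≤ w.length) :
    tiggerfyLoop w (PySem.Chars.lower w) i res = res ++ tiggerfyScan (w.drop i) := by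
  have hlow : PySem.Chars.lower w = w.map PySem.Chars.lowerChar := rfl
  induction hn : w.length - i using Nat.strong_induction_on generalizing i res with
  | _ n ih =>
  rw [tiggerfyLoop]
  by_cases h : i < w.length
  · rw [dif_pos h]
    have hd1 : w.drop i = w[i] :: w.drop (i+1) := List.drop_eq_getElem_cons h
    have hsl : PySem.List.slice (PySem.Chars.lower w) (some (i : Int)) (some ((i : Int) + 2))
        = ((w.drop i).take 2).map PySem.Chars.lowerChar := by
      rw [hlow, show PySem.List.slice (w.map PySem.Chars.lowerChar) (some (i : Int)) (some ((i : Int) + 2))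
          = ((w.map PySem.Chars.lowerChar).drop i).take 2 from by
            simpa using PySem.List.slice_natCast_add (xs := w.map PySem.Chars.lowerChar) (j := i) (n := 2)]
      simp
    have hget : PySem.List.pyGetD (PySem.Chars.lower w) (i : Int) ' ' = PySem.Chars.lowerChar w[i] := by
      rw [hlow]
      simp [PySem.List.pyGetD_natCast, List.getD_eq_getElem?_getD, h]
    have hgetw : PySem.List.pyGetD w (i : Int) ' ' = w[i] := by
      simp [PySem.List.pyGetD_natCast, List.getD_eq_getElem?_getD, h]
    have hti : (PySem.Chars.isIn [PySem.List.pyGetD (PySem.Chars.lower w) (i : Int) ' '] ['t','i'] = true)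
        ↔ (PySem.Chars.lowerChar w[i] = 't' ∨ PySem.Chars.lowerChar w[i] = 'i') := by
      rw [hget, PySem.Chars.isIn_iff_infix, List.singleton_infix_iff]
      simp
    by_cases h2 : i + 1 < w.length
    · have hd2 : w.drop (i+1) = w[i+1] :: w.drop (i+2) := List.drop_eq_getElem_cons h2
      have htake : (w.drop i).take 2 = [w[i], w[i+1]] := by rw [hd1, hd2]; rfl
      have hlt : i < w.length - 1 := by omega
      have e1 : (i < w.length - 1 ∧ PySem.List.slice (PySem.Chars.lower w) (some (i : Int)) (some ((i : Int) + 2)) = ['g','g'])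
          ↔ (PySem.Chars.lowerChar w[i] = 'g' ∧ PySem.Chars.lowerChar w[i+1] = 'g') := by
        rw [hsl, htake]; simp [hlt]
      have e2 : (i < w.length - 1 ∧ PySem.List.slice (PySem.Chars.lower w) (some (i : Int)) (some ((i : Int) + 2)) = ['e','r'])
          ↔ (PySem.Chars.lowerChar w[i] = 'e' ∧ PySem.Chars.lowerChar w[i+1] = 'r') := by
        rw [hsl, htake]; simp [hlt]
      rw [hd1, hd2, tiggerfyScan]
      simp only [e1, e2, hti]
      by_cases c1 : PySem.Chars.lowerChar w[i] = 'g' ∧ PySem.Chars.lowerChar w[i+1] = 'g'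
      · rw [if_pos c1, if_pos (Or.inl c1)]
        exact ih (w.length - (i+2)) (by omega) (i+2) res (by omega) rfl
      · rw [if_neg c1]
        by_cases c2 : PySem.Chars.lowerChar w[i] = 'e' ∧ PySem.Chars.lowerChar w[i+1] = 'r'
        · rw [if_pos c2, if_pos (Or.inr c2)]
          exact ih (w.length - (i+2)) (by omega) (i+2) res (by omega) rfl
        · have c12 : ¬((PySem.Chars.lowerChar w[i] = 'g' ∧ PySem.Chars.lowerChar w[i+1] = 'g') ∨
              (PySem.Chars.lowerChar w[i] = 'e' ∧ PySem.Chars.lowerChar w[i+1] = 'r')) := by tauto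
          rw [if_neg c2, if_neg c12]
          by_cases c3 : PySem.Chars.lowerChar w[i] = 't' ∨ PySem.Chars.lowerChar w[i] = 'i'
          · rw [if_pos c3, if_pos c3, ← hd2]
            exact ih (w.length - (i+1)) (by omega) (i+1) res (by omega) rfl
          · rw [if_neg c3, if_neg c3, ← hd2, hgetw,
              ih (w.length - (i+1)) (by omega) (i+1) (res ++ [w[i]]) (by omega) rfl]
            simp
    · have hlen : w.length = i + 1 := by omega
      have hd : w.drop i = [w[i]] := by
        rw [hd1, List.drop_eq_nil_of_le (by omega)]
      have hnlt : ¬ i < w.length - 1 := by omega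
      rw [hd, tiggerfyScan]
      simp only [hnlt, false_and, if_false, hti]
      split_ifs with c1
      · rw [tiggerfyLoop]; simp [hlen]
      · rw [tiggerfyLoop]; simp [hlen, hgetw]
  · rw [List.drop_eq_nil_of_le (by omega), tiggerfyScan]
    simp [h]

-- ===== VERDICT (by name: the statement is the Claim_ definition above) =====
theorem tiggerfy_spec : Claim_equal_tiggerfy := by
  intro word _
  unfold Spec_tiggerfy tiggerfy tiggerfy_alt
  rw [tiggerfyLoop_eq_scan word.toList 0 [] (Nat.zero_le _)]
  simp
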